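-- pv_equiv track=rewrite | github.com/BillyWangwzx/fight | stage1_py3.py | detect_bomb
-- ===== SOURCE A (Python) =====
-- def detect_bomb(cards, minimum=-1):
--     combs = []
--     dic = {}
--     for card in cards:
--         dic[card] = dic.get(card, 0) + 1
--     for card in dic:
--         if dic[card] == 4 and card > minimum:
--             combs.append([card] * 4)
--     if 13 in cards and 14 in cards:
--         combs.append([13, 14])
--     return combs
-- ===== SOURCE B (Python) =====
-- def detect_bomb(cards, minimum=-1):
--     bombs = []
--     s = sorted(cards)
--     n = len(s)
--     i = 0
--     while i < n:
--         j = i + 1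
--         while j < n and s[j] == s[i]:
--             j += 1
--         if j - i == 4 and s[i] > minimum:
--             bombs.append(s[i])
--         i = j
--     bombs.sort(key=cards.index)
--     combs = [[v] * 4 for v in bombs]
--     if 13 in cards and 14 in cards:
--         combs.append([13, 14])
--     return combs
-- ===== Notes on version B (the rewrite author's own statement) =====
-- stated objective: alternative
-- what changed: Replaces the frequency-dict pass by a sorting-based algorithm: sort the cards, detect runs of length exactly 4 by an index-based scan over the sorted copy, then stably re-sort the found bomb values by their first index in the original list to restore first-appearance order.
import Mathlib
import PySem

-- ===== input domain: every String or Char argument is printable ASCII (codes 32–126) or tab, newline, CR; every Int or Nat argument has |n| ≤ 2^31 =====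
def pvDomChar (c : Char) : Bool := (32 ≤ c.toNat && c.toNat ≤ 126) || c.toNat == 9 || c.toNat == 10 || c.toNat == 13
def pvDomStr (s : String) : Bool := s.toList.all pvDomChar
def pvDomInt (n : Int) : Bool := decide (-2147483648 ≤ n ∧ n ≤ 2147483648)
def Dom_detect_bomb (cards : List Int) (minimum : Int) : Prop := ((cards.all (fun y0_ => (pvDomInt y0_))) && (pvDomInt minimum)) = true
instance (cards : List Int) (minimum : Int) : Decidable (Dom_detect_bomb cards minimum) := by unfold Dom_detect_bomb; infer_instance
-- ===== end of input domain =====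

-- B replaces A's frequency dict by a sorting-based algorithm: sort the cards, scan the
-- sorted copy for runs of length exactly 4, then stably re-sort the bomb values by their
-- first index in the original list (alternative algorithm, same return value).

-- ===== PORT A =====
def detect_bomb (cards : List Int) (minimum : Int) : List (List Int) :=
  let dic : PySem.Dict Int Int :=
    cards.foldl (fun d card => d.insert card (d.getD card 0 + 1)) PySem.Dict.empty
  let combs : List (List Int) :=
    dic.keys.foldl (fun combs card =>
      -- dic[card]: card ranges over dic's keys, so the lookup never raises; getD … 0 is exact here
      if dic.getD card 0 == 4 && decide (card > minimum) then combs ++ [List.replicate 4 card]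
      else combs) []
  if 13 ∈ cards ∧ 14 ∈ cards then combs ++ [[13, 14]] else combs

-- ===== PORT B =====
-- inner while: 'j = i + 1; while j < n and s[j] == s[i]: j += 1' — v is s[i]
def scanRun (s : List Int) (v : Int) (j : Nat) : Nat :=
  if h : j < s.length then
    if s[j] == v then scanRun s v (j + 1) else j
  else j
termination_by s.length - j

lemma scanRun_ge (s : List Int) (v : Int) : ∀ (n j : Nat), s.length - j ≤ n → j ≤ scanRun s v j := by
  intro n
  induction n with
  | zero =>
    intro j hj
    rw [scanRun]
    have h : ¬ j < s.length := by omega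
    simp [h]
  | succ n ih =>
    intro j hj
    rw [scanRun]
    by_cases h : j < s.length
    · simp only [h, dif_pos]
      by_cases he : s[j] == v
      · simp only [he, if_pos]
        have := ih (j + 1) (by omega)
        omega
      · simp [he]
    · simp [h]

-- outer while: 'while i < n: …; i = j' over the sorted list, collecting bomb values
def runScan (minimum : Int) (s : List Int) (i : Nat) : List Int :=
  if h : i < s.length then
    let v := s[i]
    let j := scanRun s v (i + 1)
    (if j - i == 4 && decide (v > minimum) then [v] else []) ++ runScan minimum s j
  else []
termination_by s.length - i
decreasing_by
  have := scanRun_ge s s[i] (s.length - (i + 1)) (i + 1) le_rfl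
  omega

def detect_bomb_alt (cards : List Int) (minimum : Int) : List (List Int) :=
  let s := PySem.List.sorted cards (fun x => x) false
  let bombs := runScan minimum s 0
  -- bombs.sort(key=cards.index): every bomb value occurs in cards, so cards.index never
  -- raises; (index? cards v).getD 0 is exact on those values
  let bombs2 := PySem.List.sorted bombs (fun v => (PySem.List.index? cards v).getD 0) false
  let combs := bombs2.map (fun v => List.replicate 4 v)
  if 13 ∈ cards ∧ 14 ∈ cards then combs ++ [[13, 14]] else combs

-- ===== PRECONDITION & SPEC =====
def Spec_detect_bomb (cards : List Int) (minimum : Int) (out : List (List Int)) : Prop := out = detect_bomb_alt cards minimum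
instance (cards : List Int) (minimum : Int) (out : List (List Int)) : Decidable (Spec_detect_bomb cards minimum out) := by unfold Spec_detect_bomb; infer_instance

-- ===== CLAIM (what is proved, stated in full; the proofs are below) =====
def Claim_equal_detect_bomb : Prop := ∀ (cards : List Int) (minimum : Int), Dom_detect_bomb cards minimum → Spec_detect_bomb cards minimum (detect_bomb cards minimum)

-- ===== LEMMAS AND PROOFS =====

-- proof-side drop-based reformulation of B's scan, and the leading-run counter
def countLead (v : Int) : List Int → Nat
  | [] => 0
  | x :: t => if x == v then 1 + countLead v t else 0

def runScanD (minimum : Int) (s : List Int) : List Int :=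
  match s with
  | [] => []
  | v :: rest =>
      let run := 1 + countLead v rest
      (if run == 4 && decide (v > minimum) then [v] else []) ++
        runScanD minimum ((v :: rest).drop run)
termination_by s.length
decreasing_by simp

-- the inner while loop computes j + (length of the run of v starting at j)
lemma scanRun_eq_countLead (s : List Int) (v : Int) : ∀ (n j : Nat), s.length - j ≤ n →
    scanRun s v j = j + countLead v (s.drop j) := by
  intro n
  induction n with
  | zero =>
    intro j hj
    have h : ¬ j < s.length := by omega
    rw [scanRun]
    have hd : s.drop j = [] := List.drop_eq_nil_of_le (by omega)
    simp [h, hd, countLead]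
  | succ n ih =>
    intro j hj
    rw [scanRun]
    by_cases h : j < s.length
    · have hd : s.drop j = s[j] :: s.drop (j + 1) := List.drop_eq_getElem_cons h
      simp only [h, dif_pos]
      by_cases he : s[j] == v
      · rw [if_pos he, ih (j + 1) (by omega), hd]
        simp only [countLead, he, if_pos]
        omega
      · rw [if_neg he, hd]
        simp [countLead, he]
    · have hd : s.drop j = [] := List.drop_eq_nil_of_le (by omega)
      simp [h, hd, countLead]

-- the index-based outer loop equals the drop-based scan
lemma runScan_eq_drop (m : Int) (s : List Int) : ∀ (n i : Nat), s.length - i ≤ n →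
    runScan m s i = runScanD m (s.drop i) := by
  intro n
  induction n with
  | zero =>
    intro i hi
    have h : ¬ i < s.length := by omega
    rw [runScan]
    have hd : s.drop i = [] := List.drop_eq_nil_of_le (by omega)
    simp [h, hd, runScanD]
  | succ n ih =>
    intro i hi
    rw [runScan]
    by_cases h : i < s.length
    · have hd : s.drop i = s[i] :: s.drop (i + 1) := List.drop_eq_getElem_cons h
      simp only [h, dif_pos]
      have hsc : scanRun s s[i] (i + 1) = (i + 1) + countLead s[i] (s.drop (i + 1)) :=
        scanRun_eq_countLead s s[i] (s.length - (i + 1)) (i + 1) le_rfl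
      set k := countLead s[i] (s.drop (i + 1)) with hkk
      have hge : i + 1 ≤ scanRun s s[i] (i + 1) := scanRun_ge s s[i] (s.length - (i + 1)) (i + 1) le_rfl
      have hsub : scanRun s s[i] (i + 1) - i = 1 + k := by omega
      have hdropj : s.drop (scanRun s s[i] (i + 1)) = (s[i] :: s.drop (i + 1)).drop (1 + k) := by
        rw [hsc, Nat.add_comm 1 k, List.drop_succ_cons, List.drop_drop]
      have hrec : runScan m s (scanRun s s[i] (i + 1)) = runScanD m (s.drop (scanRun s s[i] (i + 1))) := by
        apply ih
        omega
      rw [hsub, hrec, hdropj, hd]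
      conv_rhs => rw [runScanD]
    · have hd : s.drop i = [] := List.drop_eq_nil_of_le (by omega)
      simp [h, hd, runScanD]


-- foldl over Set.add only appends.
lemma foldl_add_exists_append (t : List Int) : ∀ (u : List Int), ∃ w, t.foldl PySem.Set.add u = u ++ w := by
  induction t with
  | nil => intro u; exact ⟨[], by simp⟩
  | cons x t ih =>
    intro u
    by_cases h : x ∈ u
    · obtain ⟨w, hw⟩ := ih u
      exact ⟨w, by simpa [PySem.Set.add, h] using hw⟩
    · obtain ⟨w, hw⟩ := ih (u ++ [x])
      exact ⟨[x] ++ w, by simp [PySem.Set.add, h] at hw ⊢; simpa using hw⟩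

-- Two seen-sets agreeing on the elements of t produce the same newly-appended suffix.
lemma foldl_add_congr (t : List Int) : ∀ (u s : List Int), (∀ y ∈ t, (y ∈ u ↔ y ∈ s)) →
    t.foldl PySem.Set.add u = u ++ (t.foldl PySem.Set.add s).drop s.length := by
  induction t with
  | nil => intro u s _; simp
  | cons c t ih =>
    intro u s hmem
    have hc := hmem c (by simp)
    by_cases h : c ∈ s
    · have hu : c ∈ u := hc.2 h
      have := ih u s (fun y hy => hmem y (by simp [hy]))
      simpa [PySem.Set.add, h, hu] using this
    · have hu : c ∉ u := fun hcu => h (hc.1 hcu)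
      have hih := ih (u ++ [c]) (s ++ [c]) (by
        intro y hy
        constructor
        · intro hyu; rcases List.mem_append.1 hyu with h1 | h1
          · exact List.mem_append.2 (Or.inl ((hmem y (by simp [hy])).1 h1))
          · exact List.mem_append.2 (Or.inr h1)
        · intro hys; rcases List.mem_append.1 hys with h1 | h1
          · exact List.mem_append.2 (Or.inl ((hmem y (by simp [hy])).2 h1))
          · exact List.mem_append.2 (Or.inr h1))
      obtain ⟨w, hw⟩ := foldl_add_exists_append t (s ++ [c])
      have hau : PySem.Set.add u c = u ++ [c] := by simp [PySem.Set.add, hu]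
      have has : PySem.Set.add s c = s ++ [c] := by simp [PySem.Set.add, h]
      calc (c :: t).foldl PySem.Set.add u = t.foldl PySem.Set.add (u ++ [c]) := by
            rw [List.foldl_cons, hau]
        _ = (u ++ [c]) ++ (t.foldl PySem.Set.add (s ++ [c])).drop (s ++ [c]).length := hih
        _ = u ++ ((c :: t).foldl PySem.Set.add s).drop s.length := by
            rw [List.foldl_cons, has, hw]; simp

lemma foldl_add_cons_notmem (t : List Int) (x : Int) (hx : x ∉ t) :
    t.foldl PySem.Set.add [x] = x :: PySem.Set.ofList t := by
  have := foldl_add_congr t [x] [] (by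
    intro y hy
    simp only [List.mem_singleton, List.not_mem_nil, iff_false]
    exact fun h => hx (h ▸ hy))
  simpa [PySem.Set.ofList_eq_foldl] using this

-- Seen-set absorbs a replicate of an already-seen element.
lemma foldl_add_replicate (k : Nat) (v : Int) (u : List Int) (hv : v ∈ u) :
    (List.replicate k v).foldl PySem.Set.add u = u := by
  induction k with
  | zero => simp
  | succ n ih => simpa [List.replicate_succ, PySem.Set.add, hv] using ih

-- countLead counts the maximal leading run.
lemma countLead_take (v : Int) (l : List Int) : l.take (countLead v l) = List.replicate (countLead v l) v := by
  induction l with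
  | nil => simp [countLead]
  | cons x t ih =>
    by_cases h : x = v
    · subst h
      have hcl : countLead x (x :: t) = countLead x t + 1 := by simp [countLead, Nat.add_comm]
      rw [hcl]
      simp [List.replicate_succ, ih]
    · simp [countLead, h]

lemma countLead_drop_ne (v : Int) (l : List Int) {x : Int} {t : List Int}
    (h : l.drop (countLead v l) = x :: t) : x ≠ v := by
  induction l generalizing x t with
  | nil => simp at h
  | cons y l ih =>
    by_cases hy : y = v
    · subst hy
      apply ih
      have hcl : countLead y (y :: l) = countLead y l + 1 := by simp [countLead, Nat.add_comm]
      rw [hcl, List.drop_succ_cons] at h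
      exact h
    · simp [countLead, hy] at h
      rcases h with ⟨h1, _⟩
      exact h1 ▸ hy

-- The run-length scan of a sorted list returns exactly the values with count 4 above minimum,
-- in first-occurrence order.
lemma runScanD_eq (m : Int) : ∀ (n : Nat) (s : List Int), s.length ≤ n → s.Pairwise (· ≤ ·) →
    runScanD m s = (PySem.Set.ofList s).filter
      (fun v => (List.count v s == 4 : Bool) && decide (v > m)) := by
  intro n
  induction n with
  | zero =>
    intro s hs _
    have : s = [] := List.eq_nil_of_length_eq_zero (Nat.le_zero.1 hs)
    subst this; simp [runScanD, PySem.Set.ofList_eq_foldl]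
  | succ n ih =>
    intro s hs hsort
    match s with
    | [] => simp [runScanD, PySem.Set.ofList_eq_foldl]
    | v :: rest =>
      set k := countLead v rest with hk
      have htake : rest.take k = List.replicate k v := countLead_take v rest
      have hrest : rest = List.replicate k v ++ rest.drop k := by
        conv_lhs => rw [← List.take_append_drop k rest, htake]
      have hpw_rest : rest.Pairwise (· ≤ ·) := (List.pairwise_cons.1 hsort).2
      have hle : ∀ y ∈ rest, v ≤ y := (List.pairwise_cons.1 hsort).1
      have hnot : v ∉ rest.drop k := by
        intro hvmem
        match hd : rest.drop k with
        | [] => rw [hd] at hvmem; simp at hvmem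
        | x :: t =>
          have hxne : x ≠ v := countLead_drop_ne v rest hd
          have hxv : v ≤ x := hle x (by
            have : x ∈ rest.drop k := by rw [hd]; simp
            exact List.mem_of_mem_drop this)
          have hxlt : v < x := lt_of_le_of_ne hxv (fun h => hxne h.symm)
          have hpw_drop : (rest.drop k).Pairwise (· ≤ ·) :=
            List.Pairwise.sublist (List.drop_sublist k rest) hpw_rest
          rw [hd] at hvmem hpw_drop
          rcases List.mem_cons.1 hvmem with h1 | h1
          · exact hxne h1.symm
          · have := (List.pairwise_cons.1 hpw_drop).1 v h1
            omega
      have hcount_v : List.count v (v :: rest) = 1 + k := by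
        rw [List.count_cons_self, hrest]
        simp [List.count_append, List.count_eq_zero_of_not_mem hnot]
        omega
      have hofl : PySem.Set.ofList (v :: rest) = v :: PySem.Set.ofList (rest.drop k) := by
        rw [PySem.Set.ofList_eq_foldl]
        conv_lhs => rw [hrest]
        show List.foldl PySem.Set.add (PySem.Set.add [] v) (List.replicate k v ++ rest.drop k) = _
        rw [List.foldl_append, show PySem.Set.add ([] : List Int) v = [v] by simp [PySem.Set.add],
          foldl_add_replicate k v [v] (by simp), foldl_add_cons_notmem _ _ hnot]
      have hdrop_s : (v :: rest).drop (1 + countLead v rest) = rest.drop k := by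
        rw [← hk]; simp [Nat.add_comm 1 k, List.drop_succ_cons]
      have hlen : (rest.drop k).length ≤ n := by
        have hld : (rest.drop k).length = rest.length - k := List.length_drop
        have hlr : rest.length ≤ n := by simpa using Nat.succ_le_succ_iff.1 hs
        omega
      have hpw_drop : (rest.drop k).Pairwise (· ≤ ·) := List.Pairwise.sublist (List.drop_sublist k rest) hpw_rest
      have hihd := ih (rest.drop k) hlen hpw_drop
      rw [runScanD, hdrop_s, hihd, hofl, List.filter_cons, hcount_v]
      have hfilter : List.filter (fun w => List.count w (v :: rest) == 4 && decide (w > m))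
          (PySem.Set.ofList (rest.drop k)) =
          List.filter (fun w => List.count w (rest.drop k) == 4 && decide (w > m))
          (PySem.Set.ofList (rest.drop k)) := by
        apply List.filter_congr
        intro w hw
        have hwmem : w ∈ rest.drop k := (PySem.Set.mem_ofList _ _).1 hw
        have hwne : w ≠ v := fun hh => hnot (hh ▸ hwmem)
        have hcw : List.count w (v :: rest) = List.count w (rest.drop k) := by
          rw [List.count_cons_of_ne hwne.symm]
          conv_lhs => rw [hrest]
          simp [List.count_append, List.count_replicate]
          intro h'
          exact absurd h'.symm hwne
        rw [hcw]
      rw [hfilter]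
      simp only [← hk]
      by_cases hb : ((1 + k == 4) && decide (v > m)) = true
      · rw [if_pos hb, if_pos hb]
        simp
      · rw [if_neg hb, if_neg hb]
        simp

-- index? through an append whose left part misses v.
lemma index?_append_of_not_mem (l : List Int) (t : List Int) (v : Int) (hv : v ∉ l) :
    PySem.List.index? (l ++ t) v = (PySem.List.index? t v).map (· + l.length) := by
  induction l with
  | nil => simp [Option.map_id']
  | cons x l ih =>
    have hx : x ≠ v := fun h => hv (by simp [h])
    have hv' : v ∉ l := fun h => hv (by simp [h])
    rw [List.cons_append, PySem.List.index?_cons_of_ne _ hx, ih hv']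
    cases PySem.List.index? t v with
    | none => simp
    | some j =>
      simp
      omega

lemma key_lt_of_split (pre suf : List Int) (a c : Int) (ha : a ∈ pre) (hc : c ∉ pre) :
    (PySem.List.index? (pre ++ c :: suf) a).getD 0 < (PySem.List.index? (pre ++ c :: suf) c).getD 0 := by
  have h1 : PySem.List.index? (pre ++ c :: suf) a = PySem.List.index? pre a :=
    PySem.List.index?_append_of_mem _ ha
  obtain ⟨ka, hka⟩ := Option.isSome_iff_exists.1 ((PySem.List.index?_isSome_iff pre a).2 ha)
  obtain ⟨p', s', hdec, hlen, _⟩ := (PySem.List.index?_eq_some_iff pre a ka).1 hka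
  have hbound : ka < pre.length := by rw [hdec, ← hlen]; simp
  have h2 : PySem.List.index? (pre ++ c :: suf) c = some pre.length := by
    rw [index?_append_of_not_mem pre (c :: suf) c hc, PySem.List.index?_cons_self]
    simp
  rw [h1, hka, h2]
  simpa using hbound

-- The first-occurrence list is strictly increasing in first index.
lemma ofList_pairwise_key_aux (cards : List Int) : ∀ (suf pre : List Int), pre ++ suf = cards →
    (PySem.Set.ofList pre).Pairwise
      (fun a b => (PySem.List.index? cards a).getD 0 < (PySem.List.index? cards b).getD 0) →
    (PySem.Set.ofList cards).Pairwise
      (fun a b => (PySem.List.index? cards a).getD 0 < (PySem.List.index? cards b).getD 0) := by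
  intro suf
  induction suf with
  | nil =>
    intro pre h hp
    have h' : pre = cards := by simpa using h
    subst h'
    exact hp
  | cons c suf' ih =>
    intro pre h hp
    apply ih (pre ++ [c]) (by simpa using h)
    have hstep : PySem.Set.ofList (pre ++ [c]) = PySem.Set.add (PySem.Set.ofList pre) c := by
      rw [PySem.Set.ofList_eq_foldl, PySem.Set.ofList_eq_foldl, List.foldl_append]
      rfl
    rw [hstep]
    by_cases hc : c ∈ PySem.Set.ofList pre
    · simpa [PySem.Set.add, hc] using hp
    · have hadd : PySem.Set.add (PySem.Set.ofList pre) c = PySem.Set.ofList pre ++ [c] := by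
        simp [PySem.Set.add, hc]
      rw [hadd, List.pairwise_append]
      refine ⟨hp, by simp, ?_⟩
      intro a hamem b hbmem
      have hb : b = c := by simpa using hbmem
      have ha : a ∈ pre := (PySem.Set.mem_ofList _ _).1 hamem
      have hcpre : c ∉ pre := fun hm => hc ((PySem.Set.mem_ofList _ _).2 hm)
      rw [hb, ← h]
      exact key_lt_of_split pre suf' a c ha hcpre

lemma ofList_pairwise_key (cards : List Int) :
    (PySem.Set.ofList cards).Pairwise
      (fun a b => (PySem.List.index? cards a).getD 0 < (PySem.List.index? cards b).getD 0) :=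
  ofList_pairwise_key_aux cards cards [] rfl (by simp [PySem.Set.ofList_eq_foldl])

-- Two nodup lists with the same members are permutations.
lemma perm_of_nodup_mem_iff {l₁ l₂ : List Int} (h₁ : l₁.Nodup) (h₂ : l₂.Nodup)
    (hm : ∀ a, a ∈ l₁ ↔ a ∈ l₂) : l₁.Perm l₂ := by
  rw [List.perm_iff_count]
  intro a
  by_cases h : a ∈ l₁
  · rw [List.count_eq_one_of_mem h₁ h, List.count_eq_one_of_mem h₂ ((hm a).1 h)]
  · rw [List.count_eq_zero_of_not_mem h, List.count_eq_zero_of_not_mem (fun hh => h ((hm a).2 hh))]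

-- ===== VERDICT (by name: the statement is the Claim_ definition above) =====
theorem detect_bomb_spec : Claim_equal_detect_bomb := by
  intro cards minimum _
  unfold Spec_detect_bomb detect_bomb detect_bomb_alt
  simp only [PySem.Dict.foldl_insert_getD_add_one_eq_counter, PySem.Dict.keys_counter,
    PySem.Dict.getD_counter, PySem.List.foldl_append_if]
  set srt := PySem.List.sorted cards (fun x => x) false with hsrt
  have hperm : srt.Perm cards := PySem.List.sorted_perm cards (fun x => x) false
  have hsorted : srt.Pairwise (· ≤ ·) := by
    simpa using PySem.List.sorted_pairwise cards (fun x => x)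
  have hrun := runScanD_eq minimum srt.length srt le_rfl hsorted
  have hbridge : runScan minimum srt 0 = runScanD minimum srt := by
    have := runScan_eq_drop minimum srt srt.length 0 (by omega)
    simpa using this
  have hcnt : ∀ v, List.count v srt = List.count v cards := fun v => hperm.count_eq v
  have hrun' : runScan minimum srt 0 = (PySem.Set.ofList srt).filter
      (fun v => (List.count v cards == 4 : Bool) && decide (v > minimum)) := by
    rw [hbridge, hrun]
    congr 1
    funext v
    rw [hcnt v]
  have hpermOf : ((PySem.Set.ofList cards).filter
        (fun v => (List.count v cards == 4 : Bool) && decide (v > minimum))).Perm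
      (runScan minimum srt 0) := by
    rw [hrun']
    exact List.Perm.filter _ (perm_of_nodup_mem_iff (PySem.Set.nodup_ofList cards)
      (PySem.Set.nodup_ofList srt)
      (fun a => by
        rw [PySem.Set.mem_ofList, PySem.Set.mem_ofList]
        exact ⟨fun h => (hperm.mem_iff).2 h, fun h => (hperm.mem_iff).1 h⟩))
  have hpw : ((PySem.Set.ofList cards).filter
        (fun v => (List.count v cards == 4 : Bool) && decide (v > minimum))).Pairwise
      (fun a b => (PySem.List.index? cards a).getD 0 < (PySem.List.index? cards b).getD 0) :=
    List.Pairwise.sublist List.filter_sublist (ofList_pairwise_key cards)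
  have hsort2 : PySem.List.sorted (runScan minimum srt 0)
      (fun v => (PySem.List.index? cards v).getD 0) =
      (PySem.Set.ofList cards).filter
        (fun v => (List.count v cards == 4 : Bool) && decide (v > minimum)) :=
    PySem.List.sorted_eq_of_perm_of_pairwise_lt _ _ _ hpermOf hpw
  rw [hsort2]
  have hfun : (fun x : Int => ((List.count x cards : Int) == 4 && decide (x > minimum)))
      = (fun x : Int => ((List.count x cards == 4 : Bool) && decide (x > minimum))) := by
    funext x
    by_cases hc : List.count x cards = 4
    · simp [hc]
    · have hc' : (List.count x cards : Int) ≠ 4 := by exact_mod_cast hc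
      have h1 : ((List.count x cards : Int) == 4) = false := beq_eq_false_iff_ne.2 hc'
      have h2 : ((List.count x cards) == 4) = false := beq_eq_false_iff_ne.2 hc
      rw [h1, h2]
  rw [hfun]
  simp only [List.nil_append]
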